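-- pv_equiv track=rewrite | github.com/versa-networks/devops | python/PAN-to-Versa-Conversion/scripts/step-2.py | is_valid_fqdn_token
-- ===== SOURCE A (Python) =====
-- ALLOWED_FQDN_CHARS = set("abcdefghijklmnopqrstuvwxyzABCDEFGHIJKLMNOPQRSTUVWXYZ0123456789._-")
--
-- def is_valid_fqdn_token(token: str) -> bool:
--     if token == "":
--         return False
--     for ch in token:
--         if ch not in ALLOWED_FQDN_CHARS:
--             return False
--     if "." not in token:
--         return False
--     if token.startswith(".") or token.endswith("."):
--         return False
--     labels = token.split(".")
--     for lab in labels: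
--         if lab == "" or len(lab) > 63:
--             return False
--     return True
-- ===== SOURCE B (Python) =====
-- def is_valid_fqdn_token(token: str) -> bool:
--     # Single left-to-right scan: track the current label length and the
--     # number of dots seen; no split(), no per-character set lookup pass.
--     run = 0   # length of the label being read
--     dots = 0
--     for ch in token:
--         if ch == '.':
--             if run == 0:        # empty label (leading dot or "..")
--                 return False
--             dots += 1
--             run = 0
--         elif ('a' <= ch <= 'z') or ('A' <= ch <= 'Z') or ('0' <= ch <= '9') \
--                 or ch == '_' or ch == '-':
--             run += 1
--             if run > 63:        # label too long
--                 return False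
--         else:
--             return False
--     return dots > 0 and run > 0  # at least two labels, last one non-empty
-- ===== Notes on version B (the rewrite author's own statement) =====
-- stated objective: faster
-- what changed: Replaced A's three separate passes (per-char set membership, dot/prefix/suffix string checks, a dot-split plus a label loop) by a single left-to-right scan that tracks the current label length and the dot count, with no intermediate label lists.
import Mathlib
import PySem

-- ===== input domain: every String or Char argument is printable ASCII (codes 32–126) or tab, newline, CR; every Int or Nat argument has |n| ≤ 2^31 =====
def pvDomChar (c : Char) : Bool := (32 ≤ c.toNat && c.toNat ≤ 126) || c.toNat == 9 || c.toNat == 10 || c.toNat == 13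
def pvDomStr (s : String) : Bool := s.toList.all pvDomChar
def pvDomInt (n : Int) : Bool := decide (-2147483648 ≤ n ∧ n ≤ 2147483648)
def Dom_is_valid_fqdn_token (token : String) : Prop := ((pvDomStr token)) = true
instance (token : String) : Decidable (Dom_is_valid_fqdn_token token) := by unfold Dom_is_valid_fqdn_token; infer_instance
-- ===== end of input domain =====

-- B replaces A's multiple passes (char-set loop, '.' membership, startswith/endswith,
-- split('.') + label loop) with one left-to-right scan (measured faster in a timing run).

-- ===== PORT A =====
def ALLOWED_FQDN_CHARS : PySem.Set Char :=
  PySem.Set.ofList "abcdefghijklmnopqrstuvwxyzABCDEFGHIJKLMNOPQRSTUVWXYZ0123456789._-".toList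

-- the 'for ch in token' loop with its early return
def pvCharLoop : List Char → Bool
  | [] => true
  | c :: rest => if ALLOWED_FQDN_CHARS.contains c = false then false else pvCharLoop rest

-- the 'for lab in labels' loop with its early return
def pvLabelLoop : List (List Char) → Bool
  | [] => true
  | lab :: rest => if lab = [] || 63 < lab.length then false else pvLabelLoop rest

def is_valid_fqdn_token (token : String) : Bool :=
  if token == "" then false
  else if pvCharLoop token.toList = false then false
  else if PySem.Str.isIn "." token = false then false
  else if PySem.Str.startswith token "." || PySem.Str.endswith token "." then false
  else pvLabelLoop (PySem.Chars.splitOn token.toList ['.'])  -- token.split(".") (sep ≠ "", never raises)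

-- ===== PORT B =====
def pvAllowedChar (c : Char) : Bool :=
  (('a' ≤ c && c ≤ 'z') || ('A' ≤ c && c ≤ 'Z') || ('0' ≤ c && c ≤ '9') || c == '_' || c == '-')

-- the scan: run = length of the current label, dots = dots seen so far
def pvScan : List Char → Nat → Nat → Bool
  | [], run, dots => decide (0 < dots) && decide (0 < run)
  | c :: rest, run, dots =>
    if c == '.' then (if run = 0 then false else pvScan rest 0 (dots + 1))
    else if pvAllowedChar c then (if 63 < run + 1 then false else pvScan rest (run + 1) dots)
    else false

def is_valid_fqdn_token_alt (token : String) : Bool := pvScan token.toList 0 0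

-- ===== PRECONDITION & SPEC =====
def Spec_is_valid_fqdn_token (token : String) (out : Bool) : Prop := out = is_valid_fqdn_token_alt token
instance (token : String) (out : Bool) : Decidable (Spec_is_valid_fqdn_token token out) := by unfold Spec_is_valid_fqdn_token; infer_instance

-- ===== CLAIM (what is proved, stated in full; the proofs are below) =====
def Claim_equal_is_valid_fqdn_token : Prop := ∀ (token : String), Dom_is_valid_fqdn_token token → Spec_is_valid_fqdn_token token (is_valid_fqdn_token token)

-- ===== LEMMAS AND PROOFS =====

-- PySem's split with a single-char separator is Mathlib's splitOnP
theorem pv_splitOn_go_eq (c : Char) (l : List Char) :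
    ∀ (fuel : Nat) (cur : List Char) (acc : List (List Char)), l.length ≤ fuel →
    PySem.Chars.splitOn.go [c] fuel l cur acc
      = acc.reverse ++ (l.splitOnP (· == c)).modifyHead (cur.reverse ++ ·) := by
  induction l with
  | nil =>
    intro fuel cur acc _
    cases fuel <;> simp [PySem.Chars.splitOn.go, List.splitOnP_nil]
  | cons a rest ih =>
    intro fuel cur acc hle
    cases fuel with
    | zero => simp at hle
    | succ f =>
      rw [PySem.Chars.splitOn.go]
      simp only [List.length_cons, Nat.add_le_add_iff_right] at hle
      obtain ⟨h, t, hht⟩ := List.exists_cons_of_ne_nil (List.splitOnP_ne_nil (· == c) rest)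
      by_cases hac : a = c
      · subst hac
        simp only [List.isPrefixOf, beq_self_eq_true, Bool.true_and,
          if_pos, List.length_cons, List.drop_succ_cons, List.length_nil, List.drop_zero]
        rw [ih f [] (cur.reverse :: acc) hle, List.splitOnP_cons]
        simp [hht]
      · have hpre : [c].isPrefixOf (a :: rest) = false := by
          simp [List.isPrefixOf]; exact fun h' => absurd h'.symm hac
        rw [hpre]
        simp only [Bool.false_eq_true, if_false]
        rw [ih f (a :: cur) acc hle, List.splitOnP_cons]
        have : (a == c) = false := by simp [hac]
        simp [this, hht, List.append_assoc]

theorem pv_splitOn_single (c : Char) (s : List Char) :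
    PySem.Chars.splitOn s [c] = s.splitOnP (· == c) := by
  rw [PySem.Chars.splitOn, pv_splitOn_go_eq c s (s.length + 1) [] [] (by omega)]
  obtain ⟨h, t, hht⟩ := List.exists_cons_of_ne_nil (List.splitOnP_ne_nil (· == c) s)
  simp [hht]

-- A's character set equals B's range test plus the dot
theorem pv_allowed_eq (c : Char) :
    ALLOWED_FQDN_CHARS.contains c = (c == '.' || pvAllowedChar c) := by
  have h : ("abcdefghijklmnopqrstuvwxyzABCDEFGHIJKLMNOPQRSTUVWXYZ0123456789._-").toList
      = ['a','b','c','d','e','f','g','h','i','j','k','l','m','n','o','p','q','r','s','t','u','v','w','x','y','z','A','B','C','D','E','F','G','H','I','J','K','L','M','N','O','P','Q','R','S','T','U','V','W','X','Y','Z','0','1','2','3','4','5','6','7','8','9','.','_','-'] := rfl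
  rw [Bool.eq_iff_iff]
  simp [ALLOWED_FQDN_CHARS, pvAllowedChar, PySem.Set.mem_ofList, h,
    Char.ext_iff, Char.le_def, UInt32.le_iff_toNat_le, UInt32.ext_iff]
  omega

theorem pv_charLoop_iff (l : List Char) :
    pvCharLoop l = true ↔ ∀ c ∈ l, ALLOWED_FQDN_CHARS.contains c = true := by
  induction l with
  | nil => simp [pvCharLoop]
  | cons a rest ih =>
    rw [pvCharLoop]
    cases h : ALLOWED_FQDN_CHARS.contains a with
    | false =>
      rw [List.forall_mem_cons, h, if_pos rfl]
      simp
    | true =>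
      rw [List.forall_mem_cons, h, if_neg (by simp), ih]
      simp

theorem pv_labelLoop_iff (ls : List (List Char)) :
    pvLabelLoop ls = true ↔ ∀ lab ∈ ls, lab ≠ [] ∧ lab.length ≤ 63 := by
  induction ls with
  | nil => simp [pvLabelLoop]
  | cons lab rest ih =>
    rw [pvLabelLoop, List.forall_mem_cons]
    by_cases h1 : lab = []
    · rw [if_pos (by simp [h1])]
      simp [h1]
    · by_cases h2 : 63 < lab.length
      · rw [if_pos (by simp [h2])]
        constructor
        · intro hF
          exact absurd hF (by simp)
        · rintro ⟨⟨-, hle⟩, -⟩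
          omega
      · rw [if_neg (by simp [h1, h2]), ih]
        simp [h1, show lab.length ≤ 63 by omega]

theorem pv_length_splitOnP_gt_one (p : Char → Bool) (l : List Char) :
    1 < (l.splitOnP p).length ↔ ∃ c ∈ l, p c = true := by
  induction l with
  | nil => simp [List.splitOnP_nil]
  | cons a rest ih =>
    rw [List.splitOnP_cons]
    by_cases h : p a = true
    · have : 1 ≤ (rest.splitOnP p).length := List.length_pos_of_ne_nil (List.splitOnP_ne_nil p rest)
      simp [h]; omega
    · have h' : p a = false := by simpa using h
      obtain ⟨hh, t, hht⟩ := List.exists_cons_of_ne_nil (List.splitOnP_ne_nil p rest)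
      rw [hht] at ih
      simp only [List.length_cons] at ih
      simp only [h', Bool.false_eq_true, if_false, hht, List.modifyHead_cons, List.length_cons,
        List.mem_cons]
      constructor
      · intro hgt
        obtain ⟨c, hc, hp⟩ := ih.mp hgt
        exact ⟨c, Or.inr hc, hp⟩
      · rintro ⟨c, rfl | hc, hp⟩
        · rw [h'] at hp; exact absurd hp (by simp)
        · exact ih.mpr ⟨c, hc, hp⟩

theorem pv_splitOnP_concat (p : Char → Bool) (d : Char) (hd : p d = true) (l : List Char) :
    (l ++ [d]).splitOnP p = l.splitOnP p ++ [[]] := by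
  induction l with
  | nil => simp [List.splitOnP_cons, List.splitOnP_nil, hd]
  | cons a rest ih =>
    rw [List.cons_append, List.splitOnP_cons, List.splitOnP_cons, ih]
    by_cases h : p a = true
    · simp [h]
    · obtain ⟨hh, t, hht⟩ := List.exists_cons_of_ne_nil (List.splitOnP_ne_nil p rest)
      simp [h, hht]

-- the scan characterized through the split of its input
theorem pv_scan_iff (cs : List Char) : ∀ (run dots : Nat), run ≤ 63 →
    (pvScan cs run dots = true ↔
      (∀ c ∈ cs, (c == '.' || pvAllowedChar c) = true) ∧
      1 < (cs.splitOnP (· == '.')).length + dots ∧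
      (∀ lab ∈ (cs.splitOnP (· == '.')).tail, 1 ≤ lab.length ∧ lab.length ≤ 63) ∧
      1 ≤ run + ((cs.splitOnP (· == '.')).headI).length ∧
      run + ((cs.splitOnP (· == '.')).headI).length ≤ 63) := by
  induction cs with
  | nil =>
    intro run dots hrun
    simp [pvScan, List.splitOnP_nil]
    omega
  | cons a rest ih =>
    intro run dots hrun
    obtain ⟨hh, t, hht⟩ := List.exists_cons_of_ne_nil (List.splitOnP_ne_nil (· == '.') rest)
    by_cases ha : a = '.'
    · subst ha
      rw [List.splitOnP_cons]
      simp only [beq_self_eq_true, if_pos, pvScan]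
      by_cases hr : run = 0
      · subst hr
        simp
      · rw [if_neg hr, ih 0 (dots + 1) (by omega)]
        simp only [hht, List.headI_cons, List.tail_cons, List.length_cons, List.mem_cons,
          List.length_nil]
        constructor
        · rintro ⟨hall, hgt, htail, hh1, hh2⟩
          refine ⟨?_, by omega, ?_, by omega, by omega⟩
          · intro c hc
            rcases hc with rfl | hc
            · simp
            · exact hall c hc
          · intro lab hlab
            rcases hlab with rfl | hlab
            · constructor <;> omega
            · exact htail lab hlab
        · rintro ⟨hall, _, htail, _, _⟩
          have hhh := htail hh (Or.inl rfl)
          refine ⟨fun c hc => hall c (Or.inr hc), by omega,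
                  fun lab hlab => htail lab (Or.inr hlab), by omega, by omega⟩
    · have ha' : (a == '.') = false := by simp [ha]
      rw [List.splitOnP_cons]
      simp only [ha', Bool.false_eq_true, if_false, hht, List.modifyHead_cons]
      by_cases hok : pvAllowedChar a = true
      · simp only [pvScan, ha', Bool.false_eq_true, if_false, hok, if_pos]
        by_cases hbig : 63 < run + 1
        · rw [if_pos hbig]
          simp only [Bool.false_eq_true, false_iff, List.headI_cons, List.length_cons]
          rintro ⟨_, _, _, _, h2⟩
          omega
        · rw [if_neg hbig, ih (run + 1) dots (by omega), hht]
          simp only [List.headI_cons, List.tail_cons, List.length_cons, List.mem_cons]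
          constructor
          · rintro ⟨hall, hgt, htail, hh1, hh2⟩
            refine ⟨?_, by omega, htail, by omega, by omega⟩
            intro c hc
            rcases hc with rfl | hc
            · simp [hok]
            · exact hall c hc
          · rintro ⟨hall, hgt, htail, hh1, hh2⟩
            exact ⟨fun c hc => hall c (Or.inr hc), by omega, htail,
                   by omega, by omega⟩
      · simp only [pvScan, ha', Bool.false_eq_true, if_false, hok, false_iff]
        rintro ⟨hall, -⟩
        have := hall a List.mem_cons_self
        simp [ha', hok] at this

-- A's if-chain, written as one conjunction
theorem pv_A_iff (token : String) :
    is_valid_fqdn_token token = true ↔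
      (token.toList ≠ [] ∧ pvCharLoop token.toList = true ∧ PySem.Str.isIn "." token = true ∧
       PySem.Str.startswith token "." = false ∧ PySem.Str.endswith token "." = false ∧
       pvLabelLoop (token.toList.splitOnP (· == '.')) = true) := by
  have hnil : token = "" ↔ token.toList = [] := Iff.symm String.toList_eq_nil_iff
  simp only [is_valid_fqdn_token, pv_splitOn_single]
  split_ifs with h1 h2 h3 h4
  · rw [beq_iff_eq] at h1
    simp [hnil.mp h1]
  · simp [h2]
  · have h3' : PySem.Chars.isIn ['.'] token.toList = false := by simpa using h3
    simp [h3']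
  · rcases (by simpa using h4 :
        PySem.Str.startswith token "." = true ∨ PySem.Str.endswith token "." = true) with h | h
    · have h' : PySem.Chars.startswith token.toList ['.'] = true := by simpa using h
      simp [h']
    · have h' : PySem.Chars.endswith token.toList ['.'] = true := by simpa using h
      simp [h']
  · rw [beq_iff_eq] at h1
    have hne : token.toList ≠ [] := fun h => h1 (hnil.mpr h)
    have h2' : pvCharLoop token.toList = true := by simpa using h2
    have h3' : PySem.Chars.isIn ['.'] token.toList = true := by simpa using h3
    rw [Bool.or_eq_true] at h4
    rw [not_or] at h4
    have hsw' : PySem.Chars.startswith token.toList ['.'] = false := by simpa using h4.1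
    have hew' : PySem.Chars.endswith token.toList ['.'] = false := by simpa using h4.2
    simp [hne, h2', h3', hsw', hew']

-- ===== VERDICT (by name: the statement is the Claim_ definition above) =====
theorem is_valid_fqdn_token_spec : Claim_equal_is_valid_fqdn_token := by
  intro token _
  show is_valid_fqdn_token token = is_valid_fqdn_token_alt token
  rw [Bool.eq_iff_iff, pv_A_iff]
  rw [is_valid_fqdn_token_alt, pv_scan_iff token.toList 0 0 (by omega)]
  obtain ⟨hh, t, hht⟩ :=
    List.exists_cons_of_ne_nil (List.splitOnP_ne_nil (· == '.') token.toList)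
  have hdot : PySem.Str.isIn "." token = true ↔ '.' ∈ token.toList := by
    rw [PySem.Str.isIn_iff_infix]
    exact List.singleton_infix_iff '.' token.toList
  have hsw : PySem.Str.startswith token "." = true ↔ ['.'] <+: token.toList := by
    simp [PySem.Str.startswith_eq, PySem.Chars.startswith_iff]
  have hew : PySem.Str.endswith token "." = true ↔ ['.'] <:+ token.toList := by
    simp [PySem.Str.endswith_eq, PySem.Chars.endswith_iff]
  have hgt1 : 1 < (token.toList.splitOnP (· == '.')).length ↔ '.' ∈ token.toList := by
    rw [pv_length_splitOnP_gt_one]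
    simp
  rw [pv_charLoop_iff, pv_labelLoop_iff, hht]
  simp only [List.headI_cons, List.tail_cons, List.mem_cons, Nat.add_zero, Nat.zero_add,
    List.length_cons]
  constructor
  · rintro ⟨hne, hchar, hin, hsw0, hew0, hlab⟩
    have hhh := hlab hh (Or.inl rfl)
    refine ⟨?_, ?_, ?_, ?_, ?_⟩
    · intro c hc
      rw [← pv_allowed_eq]
      exact hchar c hc
    · have := hgt1.mpr (hdot.mp hin)
      rw [hht] at this
      simpa using this
    · intro lab hlab'
      have := hlab lab (Or.inr hlab')
      exact ⟨List.length_pos_of_ne_nil this.1, this.2⟩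
    · exact List.length_pos_of_ne_nil hhh.1
    · exact hhh.2
  · rintro ⟨hall, hgt, htail, h1, h2⟩
    have hgt' : 1 < (token.toList.splitOnP (· == '.')).length := by
      rw [hht]; simpa using hgt
    have hmem : '.' ∈ token.toList := hgt1.mp hgt'
    refine ⟨?_, ?_, hdot.mpr hmem, ?_, ?_, ?_⟩
    · intro h
      rw [h] at hmem
      exact absurd hmem (List.not_mem_nil)
    · intro c hc
      rw [pv_allowed_eq]
      exact hall c hc
    · rw [← Bool.not_eq_true]
      intro hstart
      obtain ⟨s', hs'⟩ := hsw.mp hstart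
      have : token.toList.splitOnP (· == '.') = [] :: s'.splitOnP (· == '.') := by
        rw [← hs', List.singleton_append, List.splitOnP_cons]
        simp
      rw [this] at hht
      have : hh = [] := by injection hht with e _; exact e.symm
      rw [this] at h1
      simp at h1
    · rw [← Bool.not_eq_true]
      intro hend
      obtain ⟨s', hs'⟩ := hew.mp hend
      have hsplit : token.toList.splitOnP (· == '.') = s'.splitOnP (· == '.') ++ [[]] := by
        rw [← hs']
        exact pv_splitOnP_concat _ '.' (by simp) s'
      have hnilmem : ([] : List Char) ∈ hh :: t := by
        rw [← hht, hsplit]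
        simp
      rw [List.mem_cons] at hnilmem
      rcases hnilmem with h | h
      · rw [← h] at h1; simp at h1
      · have := htail [] h
        simp at this
    · intro lab hlab
      rcases hlab with rfl | hlab
      · exact ⟨List.ne_nil_of_length_pos h1, h2⟩
      · have := htail lab hlab
        exact ⟨List.ne_nil_of_length_pos this.1, this.2⟩
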